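-- pv_equiv track=rewrite | github.com/bhargavaurala/accessmath-icfhr2018 | AccessMath/util/misc_helper.py | findBooleanIntervals
-- ===== SOURCE A (Python) =====
-- def findBooleanIntervals( boolean_list, value):
--     intervals = []
--     on_interval = False
--     int_ini = -1
--     int_end = -1
--
--     for idx, element in enumerate(boolean_list):
--         if element == value:
--             if not on_interval:
--                 on_interval = True
--                 int_ini = idx
--             int_end = idx
--         else:
--             if on_interval:
--                 on_interval = False
--                 intervals.append( (int_ini, int_end) )
--
--     if on_interval:
--         intervals.append( (int_ini, int_end) )
--
--     return intervals
-- ===== SOURCE B (Python) =====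
-- def findBooleanIntervals(boolean_list, value):
--     intervals = []
--     n = len(boolean_list)
--     i = 0
--     while i < n:
--         if boolean_list[i] != value:
--             i += 1
--         else:
--             j = i
--             while j + 1 < n and boolean_list[j + 1] == value:
--                 j += 1
--             intervals.append((i, j))
--             i = j + 1
--     return intervals
-- ===== Notes on version B (the rewrite author's own statement) =====
-- stated objective: alternative
-- what changed: Replaces the on_interval state-flag fold with a two-pointer scan: an inner loop consumes each whole run of matching elements and emits its inclusive interval directly, so no flag or trailing-interval flush is needed.
import Mathlib
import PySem

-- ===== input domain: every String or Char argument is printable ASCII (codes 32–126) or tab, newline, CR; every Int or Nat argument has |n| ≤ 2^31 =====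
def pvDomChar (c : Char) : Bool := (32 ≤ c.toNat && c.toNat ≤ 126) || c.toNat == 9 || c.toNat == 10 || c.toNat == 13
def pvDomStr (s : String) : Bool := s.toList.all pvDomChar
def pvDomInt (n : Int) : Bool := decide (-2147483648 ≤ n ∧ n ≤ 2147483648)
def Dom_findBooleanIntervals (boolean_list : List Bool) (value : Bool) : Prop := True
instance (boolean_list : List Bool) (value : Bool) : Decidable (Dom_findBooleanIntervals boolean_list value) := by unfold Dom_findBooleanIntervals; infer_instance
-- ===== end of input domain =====

-- B replaces A's on_interval state-flag loop by a two-pointer scan that consumes each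
-- matching run with an inner loop and emits its inclusive interval directly (objective: alternative).

-- ===== PORT A =====
-- A's for-loop over enumerate(boolean_list), transcribed as recursion carrying the
-- running index idx and the loop state (intervals, on_interval, int_ini, int_end).
def pvALoop (bl : List Bool) (value : Bool) (idx : Nat)
    (intervals : List (Int × Int)) (on_interval : Bool) (int_ini int_end : Int) :
    List (Int × Int) × Bool × Int × Int :=
  match bl with
  | [] => (intervals, on_interval, int_ini, int_end)
  | element :: rest =>
    if element == value then
      if !on_interval then
        pvALoop rest value (idx + 1) intervals true (idx : Int) (idx : Int)
      else
        pvALoop rest value (idx + 1) intervals true int_ini (idx : Int)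
    else
      if on_interval then
        pvALoop rest value (idx + 1) (intervals ++ [(int_ini, int_end)]) false int_ini int_end
      else
        pvALoop rest value (idx + 1) intervals on_interval int_ini int_end

def findBooleanIntervals (boolean_list : List Bool) (value : Bool) : List (Int × Int) :=
  let r := pvALoop boolean_list value 0 [] false (-1) (-1)
  if r.2.1 then r.1 ++ [(r.2.2.1, r.2.2.2)] else r.1

-- ===== PORT B =====
-- B's inner while loop: length of the run of elements equal to v at the front of bl.
def pvRunLen (bl : List Bool) (v : Bool) : Nat :=
  match bl with
  | [] => 0
  | x :: xs => if x == v then pvRunLen xs v + 1 else 0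

-- B's outer while loop: i is the current index; on a match the run of further matches is
-- measured, the inclusive interval emitted, and the scan resumes past the run.
def pvBScan (bl : List Bool) (v : Bool) (i : Nat) : List (Int × Int) :=
  match bl with
  | [] => []
  | x :: xs =>
    if x == v then
      let k := pvRunLen xs v
      ((i : Int), ((i + k : Nat) : Int)) :: pvBScan (xs.drop k) v (i + k + 1)
    else
      pvBScan xs v (i + 1)
termination_by bl.length
decreasing_by all_goals simp [List.length_drop]

def findBooleanIntervals_alt (boolean_list : List Bool) (value : Bool) : List (Int × Int) :=
  pvBScan boolean_list value 0

-- ===== PRECONDITION & SPEC =====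
def Spec_findBooleanIntervals (boolean_list : List Bool) (value : Bool) (out : List (Int × Int)) : Prop := out = findBooleanIntervals_alt boolean_list value
instance (boolean_list : List Bool) (value : Bool) (out : List (Int × Int)) : Decidable (Spec_findBooleanIntervals boolean_list value out) := by unfold Spec_findBooleanIntervals; infer_instance

-- ===== CLAIM (what is proved, stated in full; the proofs are below) =====
def Claim_equal_findBooleanIntervals : Prop := ∀ (boolean_list : List Bool) (value : Bool), Dom_findBooleanIntervals boolean_list value → Spec_findBooleanIntervals boolean_list value (findBooleanIntervals boolean_list value)

-- ===== LEMMAS AND PROOFS =====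

-- Finishing step of A: flush the open interval if the loop ended inside one.
def pvFinalize (r : List (Int × Int) × Bool × Int × Int) : List (Int × Int) :=
  if r.2.1 then r.1 ++ [(r.2.2.1, r.2.2.2)] else r.1

theorem pvBScan_nil (v : Bool) (i : Nat) : pvBScan [] v i = [] := by rw [pvBScan]

-- Combined loop invariant, proved by one induction on the remaining list:
-- (off) outside an interval, A's finished loop appends exactly B's scan of the rest;
-- (on) inside an interval started at s with current end e, A extends it across the
--      remaining run (length k), closes it, and continues like B past the run.
theorem pvMain (v : Bool) : ∀ (bl : List Bool),
    (∀ (i : Nat) (acc : List (Int × Int)) (s e : Int),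
      pvFinalize (pvALoop bl v i acc false s e) = acc ++ pvBScan bl v i) ∧
    (∀ (i : Nat) (acc : List (Int × Int)) (s e : Int),
      pvFinalize (pvALoop bl v i acc true s e) =
        acc ++ ((s, if pvRunLen bl v = 0 then e else ((i + pvRunLen bl v - 1 : Nat) : Int)) ::
          pvBScan (bl.drop (pvRunLen bl v)) v (i + pvRunLen bl v))) := by
  intro bl
  induction bl with
  | nil =>
    refine ⟨fun i acc s e => ?_, fun i acc s e => ?_⟩ <;>
      simp [pvALoop, pvRunLen, pvFinalize, pvBScan_nil]
  | cons x xs ih =>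
    refine ⟨fun i acc s e => ?_, fun i acc s e => ?_⟩
    · -- off state
      by_cases hx : x = v
      · simp only [pvALoop, hx, beq_self_eq_true, if_true, Bool.not_false]
        rw [ih.2 (i + 1) acc (i : Int) (i : Int)]
        rw [pvBScan]
        simp only [beq_self_eq_true, if_true]
        by_cases hk : pvRunLen xs v = 0
        · simp [hk]
        · simp only [hk, if_false]
          refine congrArg (acc ++ ·) ?_
          congr 2
          · push_cast; omega
          · omega
      · have hx' : (x == v) = false := by simp [hx]
        simp only [pvALoop, hx', Bool.false_eq_true, if_false]
        rw [ih.1 (i + 1) acc s e]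
        conv_rhs => rw [pvBScan]
        simp [hx']
    · -- on state
      by_cases hx : x = v
      · have h1 : pvRunLen (x :: xs) v = pvRunLen xs v + 1 := by simp [pvRunLen, hx]
        rw [h1]
        simp only [pvALoop, hx, beq_self_eq_true, if_true, Bool.not_true,
          Bool.false_eq_true, if_false]
        rw [ih.2 (i + 1) acc s (i : Int)]
        simp only [List.drop_succ_cons]
        refine congrArg (acc ++ ·) ?_
        by_cases hk : pvRunLen xs v = 0
        · simp [hk]
        · have hk1 : pvRunLen xs v + 1 ≠ 0 := by omega
          simp only [hk, hk1, if_false]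
          congr 2
          · omega
          · omega
      · have h1 : pvRunLen (x :: xs) v = 0 := by simp [pvRunLen, hx]
        have hx' : (x == v) = false := by simp [hx]
        rw [h1]
        simp only [pvALoop, hx', Bool.false_eq_true, if_false, if_true]
        rw [ih.1 (i + 1) (acc ++ [(s, e)]) s e]
        simp only [List.drop_zero, Nat.add_zero]
        conv_rhs => rw [pvBScan]
        simp [hx']

-- ===== VERDICT (by name: the statement is the Claim_ definition above) =====
theorem findBooleanIntervals_spec : Claim_equal_findBooleanIntervals := by
  intro bl v _
  unfold Spec_findBooleanIntervals findBooleanIntervals findBooleanIntervals_alt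
  have h := (pvMain v bl).1 0 [] (-1) (-1)
  simpa [pvFinalize] using h
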